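-- pv_equiv track=rewrite | github.com/mzmalkoc/KT.ModelEnvanterYonetimi | backend/quality.py | _contains_any_phrase
-- ===== SOURCE A (Python) =====
-- def _contains_any_phrase(text_lower: str, tokens: list[str], vocabulary: set[str]) -> bool:
--     """Check for multi-word phrases in text, or single-word stems in tokens."""
--     for term in vocabulary:
--         if " " in term:
--             # Multi-word phrase: search in raw text
--             if term in text_lower:
--                 return True
--         else:
--             # Single word: use stem matching on tokens
--             for token in tokens:
--                 if token == term or token.startswith(term):
--                     return True
--     return False
-- ===== SOURCE B (Python) =====
-- def _contains_any_phrase(text_lower: str, tokens: list[str], vocabulary: set[str]) -> bool: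
--     """B: precompute the set of all prefixes of all tokens once; the inner
--     per-term token scan is replaced by one set-membership lookup per term."""
--     prefixes = set()
--     for token in tokens:
--         for k in range(len(token) + 1):
--             prefixes.add(token[:k])
--     for term in vocabulary:
--         if " " in term:
--             if term in text_lower:
--                 return True
--         elif term in prefixes:
--             return True
--     return False
-- ===== Notes on version B (the rewrite author's own statement) =====
-- stated objective: alternative
-- what changed: B builds the set of all prefixes of all tokens once up front, replacing A's inner per-term scan over tokens (with a startswith per token) by a single set-membership lookup per single-word term.
import Mathlib
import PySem

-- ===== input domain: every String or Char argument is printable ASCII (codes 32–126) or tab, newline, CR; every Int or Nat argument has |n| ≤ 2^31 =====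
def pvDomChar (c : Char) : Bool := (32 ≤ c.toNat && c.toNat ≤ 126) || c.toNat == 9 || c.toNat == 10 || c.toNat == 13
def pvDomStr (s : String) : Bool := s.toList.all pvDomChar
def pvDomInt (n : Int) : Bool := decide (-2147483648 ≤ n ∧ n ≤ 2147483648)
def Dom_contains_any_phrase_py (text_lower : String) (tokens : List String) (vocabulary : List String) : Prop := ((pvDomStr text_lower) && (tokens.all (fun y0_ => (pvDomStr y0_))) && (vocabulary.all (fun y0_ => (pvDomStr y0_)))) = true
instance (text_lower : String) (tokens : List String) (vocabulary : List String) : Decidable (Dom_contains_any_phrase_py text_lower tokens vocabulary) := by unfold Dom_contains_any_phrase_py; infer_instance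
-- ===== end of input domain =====

-- B precomputes the set of all prefixes of all tokens once, replacing A's inner per-term token scan
-- by one set lookup per single-word term; equivalence of the returned Bool is proved on all inputs.

-- ===== PORT A =====
-- inner loop 'for token in tokens: if token == term or token.startswith(term): return True'
def aTokenLoop (term : String) : List String → Bool
  | [] => false
  | token :: rest =>
    if token == term || PySem.Str.startswith token term then true
    else aTokenLoop term rest

-- outer loop 'for term in vocabulary: …'
def aVocabLoop (text_lower : String) (tokens : List String) : List String → Bool
  | [] => false
  | term :: rest =>
    if PySem.Str.isIn " " term then
      if PySem.Str.isIn term text_lower then true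
      else aVocabLoop text_lower tokens rest
    else
      if aTokenLoop term tokens then true
      else aVocabLoop text_lower tokens rest

def contains_any_phrase_py (text_lower : String) (tokens : List String) (vocabulary : List String) : Bool :=
  aVocabLoop text_lower tokens vocabulary

-- ===== PORT B =====
-- 'prefixes = set(); for token in tokens: for k in range(len(token)+1): prefixes.add(token[:k])'
def bPrefixes (tokens : List String) : PySem.Set String :=
  tokens.foldl
    (fun s token =>
      (PySem.List.pyRange 0 (PySem.Str.len token + 1) 1).foldl
        (fun s k => PySem.Set.add s (PySem.Str.slice token none (some k))) s)
    PySem.Set.empty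

-- 'for term in vocabulary: …' with the set lookup in place of the token scan
def bVocabLoop (text_lower : String) (prefixes : PySem.Set String) : List String → Bool
  | [] => false
  | term :: rest =>
    if PySem.Str.isIn " " term then
      if PySem.Str.isIn term text_lower then true
      else bVocabLoop text_lower prefixes rest
    else
      if PySem.Set.contains prefixes term then true
      else bVocabLoop text_lower prefixes rest

def contains_any_phrase_py_alt (text_lower : String) (tokens : List String) (vocabulary : List String) : Bool :=
  bVocabLoop text_lower (bPrefixes tokens) vocabulary

-- ===== PRECONDITION & SPEC =====
def Spec_contains_any_phrase_py (text_lower : String) (tokens : List String) (vocabulary : List String) (out : Bool) : Prop := out = contains_any_phrase_py_alt text_lower tokens vocabulary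
instance (text_lower : String) (tokens : List String) (vocabulary : List String) (out : Bool) : Decidable (Spec_contains_any_phrase_py text_lower tokens vocabulary out) := by unfold Spec_contains_any_phrase_py; infer_instance

-- ===== CLAIM (what is proved, stated in full; the proofs are below) =====
def Claim_equal_contains_any_phrase_py : Prop := ∀ (text_lower : String) (tokens : List String) (vocabulary : List String), Dom_contains_any_phrase_py text_lower tokens vocabulary → Spec_contains_any_phrase_py text_lower tokens vocabulary (contains_any_phrase_py text_lower tokens vocabulary)

-- ===== LEMMAS AND PROOFS =====

theorem aTokenLoop_iff (term : String) (tokens : List String) :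
    aTokenLoop term tokens = true ↔ ∃ tok ∈ tokens, term.toList <+: tok.toList := by
  induction tokens with
  | nil => simp [aTokenLoop]
  | cons tok rest ih =>
    simp only [aTokenLoop]
    by_cases h : (tok == term || PySem.Str.startswith tok term) = true
    · simp only [h]
      constructor
      · intro _
        refine ⟨tok, List.mem_cons_self, ?_⟩
        rcases Bool.or_eq_true_iff.mp h with h1 | h1
        · rw [eq_of_beq h1]
        · have := (PySem.Chars.startswith_iff tok.toList term.toList).mp (by simpa using h1)
          exact this
      · intro _; rfl
    · rw [if_neg h, ih]
      constructor
      · rintro ⟨t, ht, hp⟩; exact ⟨t, List.mem_cons_of_mem _ ht, hp⟩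
      · rintro ⟨t, ht, hp⟩
        rcases List.mem_cons.mp ht with rfl | ht'
        · exfalso; apply h
          apply Bool.or_eq_true_iff.mpr; right
          simpa using (PySem.Chars.startswith_iff t.toList term.toList).mpr hp
        · exact ⟨t, ht', hp⟩

theorem mem_foldl_add {α β : Type} [BEq α] [LawfulBEq α] (f : β → α)
    (l : List β) (s : PySem.Set α) (y : α) :
    y ∈ l.foldl (fun s k => PySem.Set.add s (f k)) s ↔ y ∈ s ∨ ∃ k ∈ l, f k = y := by
  induction l generalizing s with
  | nil => simp
  | cons k rest ih =>
    simp only [List.foldl_cons, ih, PySem.Set.mem_add, List.mem_cons]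
    constructor
    · rintro (⟨h | h⟩ | ⟨j, hj, hf⟩)
      · exact Or.inl h
      · exact Or.inr ⟨k, Or.inl rfl, h.symm⟩
      · exact Or.inr ⟨j, Or.inr hj, hf⟩
    · rintro (h | ⟨j, (rfl | hj), hf⟩)
      · exact Or.inl (Or.inl h)
      · exact Or.inl (Or.inr hf.symm)
      · exact Or.inr ⟨j, hj, hf⟩

theorem slice_prefix_iff (token y : String) :
    (∃ k ∈ PySem.List.pyRange 0 (PySem.Str.len token + 1) 1,
        PySem.Str.slice token none (some k) = y) ↔ y.toList <+: token.toList := by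
  constructor
  · rintro ⟨k, hk, rfl⟩
    rcases (PySem.List.mem_pyRange_one).mp hk with ⟨hk0, _⟩
    have hsl : (PySem.Str.slice token none (some k)).toList = token.toList.take k.toNat := by
      rw [PySem.Str.toList_slice, PySem.Chars.slice_eq_listSlice,
        PySem.List.slice_to token.toList hk0]
    rw [hsl]
    exact List.take_prefix _ _
  · intro hp
    have hlen : y.toList.length ≤ token.toList.length := hp.length_le
    refine ⟨(y.toList.length : Int), ?_, ?_⟩
    · rw [PySem.List.mem_pyRange_one, PySem.Str.len_eq]
      constructor
      · positivity
      · exact_mod_cast Nat.lt_succ_of_le hlen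
    · have hsl : (PySem.Str.slice token none (some (y.toList.length : Int))).toList
          = token.toList.take y.toList.length := by
        rw [PySem.Str.toList_slice, PySem.Chars.slice_eq_listSlice,
          PySem.List.slice_to token.toList (by positivity)]
        simp
      have htake : token.toList.take y.toList.length = y.toList :=
        (List.prefix_iff_eq_take.mp hp).symm
      exact String.ext (hsl.trans htake)

theorem mem_bPrefixes (tokens : List String) (y : String) :
    y ∈ bPrefixes tokens ↔ ∃ tok ∈ tokens, y.toList <+: tok.toList := by
  unfold bPrefixes
  induction tokens using List.reverseRecOn with
  | nil => simp [PySem.Set.empty]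
  | append_singleton rest tok ih =>
    rw [List.foldl_append, List.foldl_cons, List.foldl_nil,
      mem_foldl_add (fun k => PySem.Str.slice tok none (some k))]
    simp only [ih, List.mem_append, List.mem_singleton]
    constructor
    · rintro (⟨t, ht, hp⟩ | ⟨k, hk, hf⟩)
      · exact ⟨t, Or.inl ht, hp⟩
      · exact ⟨tok, Or.inr rfl, (slice_prefix_iff tok y).mp ⟨k, hk, hf⟩⟩
    · rintro ⟨t, (ht | rfl), hp⟩
      · exact Or.inl ⟨t, ht, hp⟩
      · exact Or.inr ((slice_prefix_iff t y).mpr hp)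

theorem tokenLoop_eq_contains (term : String) (tokens : List String) :
    aTokenLoop term tokens = PySem.Set.contains (bPrefixes tokens) term := by
  rw [Bool.eq_iff_iff, aTokenLoop_iff]
  simp only [PySem.Set.contains, List.contains_iff_mem, mem_bPrefixes]

theorem vocabLoop_eq (text_lower : String) (tokens : List String) (vocabulary : List String) :
    aVocabLoop text_lower tokens vocabulary = bVocabLoop text_lower (bPrefixes tokens) vocabulary := by
  induction vocabulary with
  | nil => rfl
  | cons term rest ih =>
    simp only [aVocabLoop, bVocabLoop, ih, tokenLoop_eq_contains]

-- ===== VERDICT (by name: the statement is the Claim_ definition above) =====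
theorem contains_any_phrase_py_spec : Claim_equal_contains_any_phrase_py := by
  intro text_lower tokens vocabulary _
  unfold Spec_contains_any_phrase_py contains_any_phrase_py contains_any_phrase_py_alt
  exact vocabLoop_eq text_lower tokens vocabulary
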